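-- pv_equiv track=rewrite | github.com/lkzfox/lotofacil | v2/libs/helper.py | todasSquenciasTamanho
-- ===== SOURCE A (Python) =====
-- def todasSquenciasTamanho(numeros, tamanho = 3):
-- 	todas = []
-- 	tamanho_sequencia = 0
-- 	for n in range(len(numeros) - 1):
-- 		if (numeros[n] + 1 == numeros[n+1]):
-- 			tamanho_sequencia += 1
-- 		elif tamanho_sequencia == tamanho - 1:
-- 			seq = [numeros[x] for x in range(n, n - tamanho, -1)]
-- 			seq.sort()
-- 			todas.append(seq)
-- 			tamanho_sequencia = 0
-- 		else:
-- 			tamanho_sequencia = 0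
--
-- 	return todas
-- ===== SOURCE B (Python) =====
-- def todasSquenciasTamanho(numeros, tamanho = 3):
--     if tamanho <= 0:
--         return []
--     todas = []
--     # candidate start i: window numeros[i:i+tamanho], which must be followed by a breaking element
--     for i in range(len(numeros) - tamanho):
--         if (all(numeros[i + j] + 1 == numeros[i + j + 1] for j in range(tamanho - 1))
--                 and (i == 0 or numeros[i - 1] + 1 != numeros[i])
--                 and numeros[i + tamanho - 1] + 1 != numeros[i + tamanho]):
--             todas.append(numeros[i:i + tamanho])
--     return todas
-- ===== Notes on version B (the rewrite author's own statement) =====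
-- stated objective: alternative
-- what changed: A's single-pass counter state machine (tracking the current run length and emitting the previous tamanho elements, sorted, when a break falls exactly at run length tamanho-1) is replaced by a direct scan over candidate window start indices that tests each window in place: all adjacent pairs consecutive, left-maximal, and followed by a breaking element; the window is appended as a slice with no sort.
import Mathlib
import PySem

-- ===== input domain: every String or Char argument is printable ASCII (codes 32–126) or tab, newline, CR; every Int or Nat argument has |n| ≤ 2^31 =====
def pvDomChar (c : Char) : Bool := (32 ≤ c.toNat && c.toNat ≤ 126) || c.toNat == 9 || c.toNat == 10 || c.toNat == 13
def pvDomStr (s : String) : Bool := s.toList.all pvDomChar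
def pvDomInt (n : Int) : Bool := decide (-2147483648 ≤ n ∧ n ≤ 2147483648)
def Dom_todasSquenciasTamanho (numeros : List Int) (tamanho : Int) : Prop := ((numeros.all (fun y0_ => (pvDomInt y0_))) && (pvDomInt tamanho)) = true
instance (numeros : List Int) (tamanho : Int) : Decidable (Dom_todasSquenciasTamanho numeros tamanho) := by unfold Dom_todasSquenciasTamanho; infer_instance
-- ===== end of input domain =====

-- B replaces A's counter state machine by a direct window scan over candidate start
-- indices, testing each window and its boundaries in place (objective: alternative
-- decomposition, similar cost).

-- ===== PORT A =====
-- Loop body of A's for-loop; state = (todas, tamanho_sequencia).  All indexing is via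
-- pyGetD: every index A actually reads is in range (the counter guarantees n-tamanho+1 ≥ 0),
-- so the default is never produced.
def pvStepA (numeros : List Int) (tamanho : Int) (s : List (List Int) × Int) (n : Int) :
    List (List Int) × Int :=
  if PySem.List.pyGetD numeros n 0 + 1 = PySem.List.pyGetD numeros (n + 1) 0 then
    (s.1, s.2 + 1)
  else if s.2 = tamanho - 1 then
    (s.1 ++ [PySem.List.sorted
        ((PySem.List.pyRange n (n - tamanho) (-1)).map (fun x => PySem.List.pyGetD numeros x 0))
        (fun y => y) false], 0)
  else (s.1, 0)

def todasSquenciasTamanho (numeros : List Int) (tamanho : Int) : List (List Int) :=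
  ((PySem.List.pyRange 0 ((numeros.length : Int) - 1) 1).foldl
    (pvStepA numeros tamanho) ([], 0)).1

-- ===== PORT B =====
-- B's window test: all adjacent pairs inside the window are consecutive, the window is
-- left-maximal, and a breaking element follows it.
def pvCondB (numeros : List Int) (tamanho : Int) (i : Int) : Bool :=
  ((PySem.List.pyRange 0 (tamanho - 1) 1).all
      (fun j => PySem.List.pyGetD numeros (i + j) 0 + 1 == PySem.List.pyGetD numeros (i + j + 1) 0))
  && (i == 0 || !(PySem.List.pyGetD numeros (i - 1) 0 + 1 == PySem.List.pyGetD numeros i 0))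
  && !(PySem.List.pyGetD numeros (i + tamanho - 1) 0 + 1 == PySem.List.pyGetD numeros (i + tamanho) 0)

def todasSquenciasTamanho_alt (numeros : List Int) (tamanho : Int) : List (List Int) :=
  if tamanho ≤ 0 then []
  else
    (PySem.List.pyRange 0 ((numeros.length : Int) - tamanho) 1).foldl
      (fun todas i =>
        if pvCondB numeros tamanho i then
          todas ++ [PySem.List.slice numeros (some i) (some (i + tamanho))]
        else todas) []

-- ===== PRECONDITION & SPEC =====
def Spec_todasSquenciasTamanho (numeros : List Int) (tamanho : Int) (out : List (List Int)) : Prop := out = todasSquenciasTamanho_alt numeros tamanho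
instance (numeros : List Int) (tamanho : Int) (out : List (List Int)) : Decidable (Spec_todasSquenciasTamanho numeros tamanho out) := by unfold Spec_todasSquenciasTamanho; infer_instance

-- ===== CLAIM (what is proved, stated in full; the proofs are below) =====
def Claim_equal_todasSquenciasTamanho : Prop := ∀ (numeros : List Int) (tamanho : Int), Dom_todasSquenciasTamanho numeros tamanho → Spec_todasSquenciasTamanho numeros tamanho (todasSquenciasTamanho numeros tamanho)

-- ===== LEMMAS AND PROOFS =====

-- length of the maximal run of consecutive increments ending just before position n
def pvRun (L : List Int) : Nat → Nat
  | 0 => 0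
  | n + 1 =>
    if PySem.List.pyGetD L (n : Int) 0 + 1 = PySem.List.pyGetD L ((n : Int) + 1) 0 then
      pvRun L n + 1
    else 0

def pvWinA (L : List Int) (T : Int) (n : Int) : List Int :=
  PySem.List.sorted ((PySem.List.pyRange n (n - T) (-1)).map (fun x => PySem.List.pyGetD L x 0))
    (fun y => y) false

def pvEmitA (L : List Int) (T : Int) (l : List Nat) : List (List Int) :=
  l.filterMap (fun (n : Nat) =>
    if PySem.List.pyGetD L (n : Int) 0 + 1 = PySem.List.pyGetD L ((n : Int) + 1) 0 then none
    else if (pvRun L n : Int) = T - 1 then some (pvWinA L T (n : Int)) else none)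

lemma pvFoldA_spec (L : List Int) (T : Int) :
    ∀ (k m : Nat) (acc : List (List Int)),
      ((List.range' m k).map (fun (n : Nat) => (n : Int))).foldl (pvStepA L T) (acc, (pvRun L m : Int))
        = (acc ++ pvEmitA L T (List.range' m k), (pvRun L (m + k) : Int)) := by
  intro k
  induction k with
  | zero => intro m acc; simp [pvEmitA]
  | succ k ih =>
    intro m acc
    rw [List.range'_succ]
    simp only [List.map_cons, List.foldl_cons, pvEmitA, List.filterMap_cons]
    by_cases h1 : PySem.List.pyGetD L (m : Int) 0 + 1 = PySem.List.pyGetD L ((m : Int) + 1) 0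
    · have hrun : pvRun L (m + 1) = pvRun L m + 1 := by simp only [pvRun, if_pos h1]
      rw [show pvStepA L T (acc, (pvRun L m : Int)) (m : Int)
            = (acc, (pvRun L (m + 1) : Int)) from by
        simp only [pvStepA, if_pos h1, hrun]; push_cast; rfl]
      rw [if_pos h1]
      have h := ih (m + 1) acc
      simp only [pvEmitA] at h
      rw [h, show m + 1 + k = m + (k + 1) from by omega]
    · have hr : pvRun L (m + 1) = 0 := by simp only [pvRun, if_neg h1]
      by_cases h2 : (pvRun L m : Int) = T - 1
      · rw [show pvStepA L T (acc, (pvRun L m : Int)) (m : Int)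
              = (acc ++ [pvWinA L T (m : Int)], (pvRun L (m + 1) : Int)) from by
          simp only [pvStepA, if_neg h1, if_pos h2, hr, Nat.cast_zero, pvWinA]]
        rw [if_neg h1, if_pos h2]
        have h := ih (m + 1) (acc ++ [pvWinA L T (m : Int)])
        simp only [pvEmitA] at h
        rw [h, show m + 1 + k = m + (k + 1) from by omega, List.append_assoc,
          List.singleton_append]
      · rw [show pvStepA L T (acc, (pvRun L m : Int)) (m : Int)
              = (acc, (pvRun L (m + 1) : Int)) from by
          simp only [pvStepA, if_neg h1, if_neg h2, hr, Nat.cast_zero]]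
        rw [if_neg h1, if_neg h2]
        have h := ih (m + 1) acc
        simp only [pvEmitA] at h
        rw [h, show m + 1 + k = m + (k + 1) from by omega]

lemma pvA_eq (L : List Int) (T : Int) :
    todasSquenciasTamanho L T = pvEmitA L T (List.range ((L.length : Int) - 1).toNat) := by
  unfold todasSquenciasTamanho
  rw [PySem.List.pyRange_one]
  simp only [sub_zero, zero_add]
  have h := pvFoldA_spec L T (((L.length : Int) - 1).toNat) 0 []
  rw [← List.range_eq_range'] at h
  norm_num [show pvRun L 0 = 0 from rfl] at h
  rw [show ((L.length : Int) - 1).toNat = L.length - 1 from by omega]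
  rw [h]

lemma pvFoldIf {α β : Type} (p : α → Bool) (f : α → β) :
    ∀ (l : List α) (acc : List β),
      l.foldl (fun a x => if p x then a ++ [f x] else a) acc
        = acc ++ l.filterMap (fun x => if p x then some (f x) else none) := by
  intro l
  induction l with
  | nil => intro acc; simp
  | cons x l ih =>
    intro acc
    by_cases h : p x
    · simp [h, ih]
    · simp [h, ih]

lemma pvB_eq (L : List Int) (T : Int) (hT : ¬ T ≤ 0) :
    todasSquenciasTamanho_alt L T
      = (List.range ((L.length : Int) - T).toNat).filterMap (fun (i : Nat) =>
          if pvCondB L T (i : Int) then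
            some (PySem.List.slice L (some (i : Int)) (some ((i : Int) + T)))
          else none) := by
  unfold todasSquenciasTamanho_alt
  rw [if_neg hT, PySem.List.pyRange_one]
  simp only [sub_zero, zero_add]
  rw [List.foldl_map]
  rw [pvFoldIf (fun (n : Nat) => pvCondB L T (n : Int))
    (fun (n : Nat) => PySem.List.slice L (some (n : Int)) (some ((n : Int) + T)))]
  simp

abbrev pvI (L : List Int) (t : Nat) : Prop :=
  PySem.List.pyGetD L (t : Int) 0 + 1 = PySem.List.pyGetD L ((t : Int) + 1) 0

lemma pvRun_le (L : List Int) : ∀ n, pvRun L n ≤ n := by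
  intro n
  induction n with
  | zero => simp [pvRun]
  | succ n ih =>
    by_cases h : pvI L n
    · simp only [pvRun, if_pos h]; omega
    · simp only [pvRun, if_neg h]; omega

lemma pvRun_inc (L : List Int) : ∀ n t, n - pvRun L n ≤ t → t < n → pvI L t := by
  intro n
  induction n with
  | zero => omega
  | succ n ih =>
    intro t h1 h2
    by_cases h : pvI L n
    · rw [show pvRun L (n + 1) = pvRun L n + 1 from by simp only [pvRun, if_pos h]] at h1
      by_cases ht : t = n
      · exact ht ▸ h
      · exact ih t (by omega) (by omega)
    · rw [show pvRun L (n + 1) = 0 from by simp only [pvRun, if_neg h]] at h1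
      omega

lemma pvRun_bd (L : List Int) : ∀ n, pvRun L n < n → ¬ pvI L (n - pvRun L n - 1) := by
  intro n
  induction n with
  | zero => omega
  | succ n ih =>
    intro hlt
    by_cases h : pvI L n
    · have hs : pvRun L (n + 1) = pvRun L n + 1 := by simp only [pvRun, if_pos h]
      rw [hs] at hlt ⊢
      rw [show n + 1 - (pvRun L n + 1) - 1 = n - pvRun L n - 1 from by omega]
      exact ih (by omega)
    · have hs : pvRun L (n + 1) = 0 := by simp only [pvRun, if_neg h]
      rw [hs, show n + 1 - 0 - 1 = n from by omega]
      exact h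

lemma pvRun_eq_of (L : List Int) :
    ∀ n c, c ≤ n → (∀ t, n - c ≤ t → t < n → pvI L t) →
      (c = n ∨ ¬ pvI L (n - c - 1)) → pvRun L n = c := by
  intro n
  induction n with
  | zero => intro c hc _ _; simp [pvRun]; omega
  | succ n ih =>
    intro c hc hrun hbd
    cases c with
    | zero =>
      have hn : ¬ pvI L n := by
        rcases hbd with he | hb
        · omega
        · rw [show n + 1 - 0 - 1 = n from by omega] at hb; exact hb
      simp only [pvRun, if_neg hn]
    | succ c =>
      have hIn : pvI L n := hrun n (by omega) (by omega)
      rw [show pvRun L (n + 1) = pvRun L n + 1 from by simp only [pvRun, if_pos hIn]]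
      have : pvRun L n = c := by
        apply ih c (by omega)
        · intro t h1 h2; exact hrun t (by omega) (by omega)
        · rcases hbd with he | hb
          · left; omega
          · right; rw [show n + 1 - (c + 1) - 1 = n - c - 1 from by omega] at hb; exact hb
      omega

lemma pvChain (L : List Int) (s M : Nat) (hinc : ∀ t, t < M → pvI L (s + t)) :
    ∀ t, t ≤ M → PySem.List.pyGetD L ((s + t : Nat) : Int) 0
      = PySem.List.pyGetD L (s : Int) 0 + t := by
  intro t
  induction t with
  | zero => simp
  | succ t ih =>
    intro h
    have hI := hinc t (by omega)
    unfold pvI at hI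
    have hidx : ((s + (t + 1) : Nat) : Int) = ((s + t : Nat) : Int) + 1 := by push_cast; ring
    rw [hidx, ← hI, ih (by omega)]
    push_cast; ring

lemma pvSliceList (L : List Int) (T' s : Nat) (h : s + T' ≤ L.length) :
    PySem.List.slice L (some (s : Int)) (some ((s : Int) + (T' : Int)))
      = (List.range T').map (fun t => PySem.List.pyGetD L ((s + t : Nat) : Int) 0) := by
  rw [show ((s : Int) + (T' : Int)) = ((s + T' : Nat) : Int) from by push_cast; ring]
  rw [PySem.List.slice_natCast, show s + T' - s = T' from by omega]
  apply List.ext_getElem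
  · simp; omega
  · intro t h1 h2
    have ht : t < T' := by simpa using h2
    have hst : s + t < L.length := by omega
    simp only [List.getElem_take, List.getElem_drop, List.getElem_map, List.getElem_range,
      PySem.List.pyGetD_natCast]
    rw [List.getD_eq_getElem L 0 hst]

lemma pvWin_eq (L : List Int) (T : Int) (hT : ¬ T ≤ 0) (s : Nat)
    (hlen : s + T.toNat ≤ L.length)
    (hinc : ∀ t, t < T.toNat - 1 → pvI L (s + t)) :
    pvWinA L T ((T.toNat - 1 + s : Nat) : Int)
      = PySem.List.slice L (some (s : Int)) (some ((s : Int) + T)) := by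
  have hTT : ((T.toNat : Nat) : Int) = T := Int.toNat_of_nonneg (by omega)
  have hT1 : 1 ≤ T.toNat := by omega
  rw [show ((s : Int) + T) = ((s : Int) + ((T.toNat : Nat) : Int)) from by rw [hTT]]
  rw [pvSliceList L T.toNat s hlen]
  unfold pvWinA
  rw [PySem.List.pyRange_neg_one]
  rw [show (((T.toNat - 1 + s : Nat) : Int) - (((T.toNat - 1 + s : Nat) : Int) - T)).toNat
        = T.toNat from by omega]
  have hchain := pvChain L s (T.toNat - 1) hinc
  apply PySem.List.sorted_eq_of_perm_of_pairwise_lt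
  · -- the A-side index list is the reverse of the slice's index list
    have hidx : (List.range T.toNat).map (fun (k : Nat) => ((T.toNat - 1 + s : Nat) : Int) - (k : Int))
        = ((List.range T.toNat).map (fun (t : Nat) => ((s + t : Nat) : Int))).reverse := by
      apply List.ext_getElem
      · simp
      · intro k h1 h2
        have hk : k < T.toNat := by simpa using h1
        simp only [List.getElem_map, List.getElem_range, List.getElem_reverse, List.length_map,
          List.length_range]
        omega
    rw [hidx, List.map_reverse, List.map_map]
    exact (List.reverse_perm _).symm
  · rw [List.pairwise_map]
    rw [List.pairwise_iff_getElem]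
    intro a b ha hb hab
    simp only [List.getElem_range]
    have ha' : a < T.toNat := by simpa using ha
    have hb' : b < T.toNat := by simpa using hb
    rw [hchain a (by omega), hchain b (by omega)]
    omega

lemma pvRangeSplit (a b : Nat) : List.range (a + b) = List.range a ++ List.range' a b := by
  rw [List.range_eq_range', List.range_eq_range', ← List.range'_append]
  simp

lemma pvShift {β : Type} (f g : Nat → Option β) :
    ∀ (k a b : Nat), (∀ t, t < k → f (a + t) = g (b + t)) →
      (List.range' a k).filterMap f = (List.range' b k).filterMap g := by
  intro k
  induction k with
  | zero => intro a b _; simp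
  | succ k ih =>
    intro a b h
    rw [List.range'_succ, List.range'_succ, List.filterMap_cons, List.filterMap_cons]
    have h0 : f a = g b := by simpa using h 0 (by omega)
    have hrest : (List.range' (a + 1) k).filterMap f = (List.range' (b + 1) k).filterMap g := by
      apply ih
      intro t ht
      have := h (t + 1) (by omega)
      rwa [show a + (t + 1) = a + 1 + t from by omega, show b + (t + 1) = b + 1 + t from by omega] at this
    rw [h0, hrest]

lemma pvPoint (L : List Int) (T : Int) (hT : ¬ T ≤ 0) (s : Nat)
    (hs : s < ((L.length : Int) - T).toNat) :
    (if PySem.List.pyGetD L ((T.toNat - 1 + s : Nat) : Int) 0 + 1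
          = PySem.List.pyGetD L (((T.toNat - 1 + s : Nat) : Int) + 1) 0 then none
     else if (pvRun L (T.toNat - 1 + s) : Int) = T - 1 then
       some (pvWinA L T ((T.toNat - 1 + s : Nat) : Int))
     else none)
      = (if pvCondB L T (s : Int) then
          some (PySem.List.slice L (some (s : Int)) (some ((s : Int) + T)))
        else none) := by
  have hTT : ((T.toNat : Nat) : Int) = T := Int.toNat_of_nonneg (by omega)
  have hT1 : 1 ≤ T.toNat := by omega
  have hN : s + T.toNat < L.length := by omega
  set T' := T.toNat with hT'
  set n := T' - 1 + s with hn
  -- unfold pvCondB into its three conjuncts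
  have hcond : pvCondB L T (s : Int) = true ↔
      ((∀ t : Nat, t < T' - 1 → pvI L (s + t)) ∧
       (s = 0 ∨ ¬ pvI L (s - 1)) ∧ ¬ pvI L n) := by
    unfold pvCondB
    simp only [Bool.and_eq_true, Bool.or_eq_true, Bool.not_eq_true', List.all_eq_true,
      beq_iff_eq, beq_eq_false_iff_ne, ne_eq]
    constructor
    · rintro ⟨⟨hall, hleft⟩, hbrk⟩
      refine ⟨?_, ?_, ?_⟩
      · intro t ht
        have hmem : ((t : Int)) ∈ PySem.List.pyRange 0 (T - 1) 1 := by
          rw [PySem.List.mem_pyRange_one]; omega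
        have := hall _ hmem
        unfold pvI
        rw [show ((s + t : Nat) : Int) = (s : Int) + (t : Int) from by push_cast; ring]
        rw [show ((s : Int) + (t : Int)) + 1 = (s : Int) + (t : Int) + 1 from rfl]
        exact this
      · by_cases h0 : s = 0
        · left; exact h0
        · right
          rcases hleft with hz | hne
          · exact absurd hz (by omega)
          · intro hI
            apply hne
            rwa [show ((s - 1 : Nat) : Int) = (s : Int) - 1 from by omega,
              show ((s : Int) - 1) + 1 = (s : Int) from by ring] at hI
      · intro hI
        apply hbrk
        rw [show ((s : Int) + T - 1) = ((n : Nat) : Int) from by omega,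
          show ((s : Int) + T) = ((n : Nat) : Int) + 1 from by omega]
        exact hI
    · rintro ⟨hall, hleft, hbrk⟩
      refine ⟨⟨?_, ?_⟩, ?_⟩
      · intro x hmem
        rw [PySem.List.mem_pyRange_one] at hmem
        have hx : x = ((x.toNat : Nat) : Int) := by omega
        have := hall x.toNat (by omega)
        rw [show (s : Int) + x = ((s + x.toNat : Nat) : Int) from by omega]
        exact this
      · by_cases h0 : s = 0
        · left; omega
        · right
          rcases hleft with hz | hne
          · exact absurd hz h0
          · intro hI
            apply hne
            show PySem.List.pyGetD L ((s - 1 : Nat) : Int) 0 + 1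
              = PySem.List.pyGetD L (((s - 1 : Nat) : Int) + 1) 0
            rw [show ((s - 1 : Nat) : Int) = (s : Int) - 1 from by omega,
              show ((s : Int) - 1) + 1 = (s : Int) from by ring]
            exact hI
      · intro hI
        apply hbrk
        show PySem.List.pyGetD L ((n : Nat) : Int) 0 + 1
          = PySem.List.pyGetD L (((n : Nat) : Int) + 1) 0
        rw [show ((n : Nat) : Int) = (s : Int) + T - 1 from by omega,
          show (s : Int) + T - 1 + 1 = (s : Int) + T from by ring]
        exact hI
  by_cases hI : pvI L n
  · rw [if_pos hI]
    have : ¬ pvCondB L T (s : Int) = true := by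
      intro hc; rcases hcond.mp hc with ⟨_, _, h3⟩; exact h3 hI
    simp [this]
  · rw [if_neg hI]
    have hrcast : ((pvRun L n : Nat) : Int) = T - 1 ↔ pvRun L n = T' - 1 := by omega
    by_cases hr : pvRun L n = T' - 1
    · have hinc : ∀ t, t < T' - 1 → pvI L (s + t) := by
        intro t ht
        have := pvRun_inc L n (s + t) (by omega) (by omega)
        exact this
      have hleft : s = 0 ∨ ¬ pvI L (s - 1) := by
        by_cases h0 : s = 0
        · left; exact h0
        · right
          have hlt : pvRun L n < n := by omega
          have := pvRun_bd L n hlt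
          rwa [show n - pvRun L n - 1 = s - 1 from by omega] at this
      rw [if_pos (hrcast.mpr hr), if_pos (hcond.mpr ⟨hinc, hleft, hI⟩)]
      rw [pvWin_eq L T hT s (by omega) hinc]
    · rw [if_neg (fun h => hr (hrcast.mp h))]
      have : ¬ pvCondB L T (s : Int) = true := by
        intro hc
        rcases hcond.mp hc with ⟨hall, hleft, _⟩
        apply hr
        apply pvRun_eq_of L n (T' - 1) (by omega)
        · intro t h1 h2
          have := hall (t - s) (by omega)
          rwa [show s + (t - s) = t from by omega] at this
        · rcases hleft with h0 | hne
          · left; omega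
          · right
            rwa [show n - (T' - 1) - 1 = s - 1 from by omega]
      simp [this]

-- ===== VERDICT (by name: the statement is the Claim_ definition above) =====
theorem todasSquenciasTamanho_spec : Claim_equal_todasSquenciasTamanho := by
  unfold Claim_equal_todasSquenciasTamanho Spec_todasSquenciasTamanho
  intro L T _
  by_cases hT : T ≤ 0
  · rw [pvA_eq]
    unfold todasSquenciasTamanho_alt
    rw [if_pos hT]
    unfold pvEmitA
    rw [List.filterMap_eq_nil_iff]
    intro n _
    split_ifs with h1 h2
    · rfl
    · exfalso; omega
    · rfl
  · rw [pvA_eq, pvB_eq L T hT]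
    have hTT : ((T.toNat : Nat) : Int) = T := Int.toNat_of_nonneg (by omega)
    by_cases hNT : L.length ≤ T.toNat
    · rw [show ((L.length : Int) - T).toNat = 0 from by omega]
      simp only [List.range_zero, List.filterMap_nil]
      unfold pvEmitA
      rw [List.filterMap_eq_nil_iff]
      intro n hn
      rw [List.mem_range] at hn
      have hle := pvRun_le L n
      split_ifs with h1 h2
      · rfl
      · exfalso; omega
      · rfl
    · rw [show ((L.length : Int) - 1).toNat
          = (T.toNat - 1) + ((L.length : Int) - T).toNat from by omega]
      unfold pvEmitA
      rw [pvRangeSplit, List.filterMap_append]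
      have hpre : (List.range (T.toNat - 1)).filterMap
          (fun (n : Nat) =>
            if PySem.List.pyGetD L (n : Int) 0 + 1 = PySem.List.pyGetD L ((n : Int) + 1) 0 then
              none
            else if (pvRun L n : Int) = T - 1 then some (pvWinA L T (n : Int)) else none)
          = [] := by
        rw [List.filterMap_eq_nil_iff]
        intro n hn
        rw [List.mem_range] at hn
        have hle := pvRun_le L n
        split_ifs with h1 h2
        · rfl
        · exfalso; omega
        · rfl
      rw [hpre, List.nil_append]
      rw [show List.range (((L.length : Int) - T).toNat)
            = List.range' 0 (((L.length : Int) - T).toNat) from List.range_eq_range']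
      apply pvShift
      intro t ht
      rw [Nat.zero_add]
      exact pvPoint L T hT t ht
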